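-- pv_equiv track=rewrite | github.com/patlegu/guitarfretboard | guitarfretboard/notes.py | identify_chord_type
-- ===== SOURCE A (Python) =====
-- from typing import List
--
-- NOTE_NAMES = ["C", "C#", "D", "Eb", "E", "F", "F#", "G", "G#", "A", "Bb", "B"]
--
-- def get_pitch_name(semitones: int) -> str:
--     """Gets a standard note name for a semitone value (0-11)."""
--     return NOTE_NAMES[semitones % 12]
--
-- CHORD_PATTERNS = {
--     (0, 4, 7): "Major",
--     (0, 3, 7): "minor",
--     (0, 4, 7, 10): "7",
--     (0, 4, 7, 11): "Major 7",
--     (0, 3, 7, 10): "minor 7",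
--     (0, 3, 7, 11): "minor Major 7",
--     (0, 4, 8): "Augmented",
--     (0, 3, 6): "Diminished",
--     (0, 3, 6, 9): "Diminished 7",
--     (0, 3, 6, 10): "m7b5",
--     (0, 2, 7): "Sus2",
--     (0, 5, 7): "Sus4",
--     (0, 7): "5 (Power Chord)",
--     (0, 4, 7, 9): "6",
--     (0, 3, 7, 9): "m6",
-- }
--
-- def identify_chord_type(semitones: List[int]) -> str:
--     """
--     Given a list of absolute semitones, identifies the chord type.
--     """
--     if not semitones:
--         return ""
--
--     # Identify unique tones and the lowest physical note
--     lowest_note = min(semitones)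
--     root_candidate = lowest_note % 12
--
--     unique_tones = sorted(list(set([t % 12 for t in semitones])))
--
--     # Try the lowest note as root first
--     def check_pattern(root):
--         pattern = tuple(sorted([(t - root) % 12 for t in unique_tones]))
--         if pattern in CHORD_PATTERNS:
--             return f"{get_pitch_name(root)} {CHORD_PATTERNS[pattern]}"
--         return None
--
--     # 1. Try lowest note
--     result = check_pattern(root_candidate)
--     if result:
--         return result
--
--     # 2. Try all other notes as roots (for inversions)
--     for t in unique_tones:
--         if t == root_candidate:
--             continue
--         result = check_pattern(t)
--         if result:
--             return f"{result} (Inversion)"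
--
--     return "Unknown Chord"
-- ===== SOURCE B (Python) =====
-- from typing import List
--
-- NOTE_NAMES = ["C", "C#", "D", "Eb", "E", "F", "F#", "G", "G#", "A", "Bb", "B"]
--
-- CHORD_PATTERNS = {
--     (0, 4, 7): "Major",
--     (0, 3, 7): "minor",
--     (0, 4, 7, 10): "7",
--     (0, 4, 7, 11): "Major 7",
--     (0, 3, 7, 10): "minor 7",
--     (0, 3, 7, 11): "minor Major 7",
--     (0, 4, 8): "Augmented",
--     (0, 3, 6): "Diminished",
--     (0, 3, 6, 9): "Diminished 7",
--     (0, 3, 6, 10): "m7b5",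
--     (0, 2, 7): "Sus2",
--     (0, 5, 7): "Sus4",
--     (0, 7): "5 (Power Chord)",
--     (0, 4, 7, 9): "6",
--     (0, 3, 7, 9): "m6",
-- }
--
-- # Reverse index built ONCE: canonical pitch-class set (as a sorted tuple) -> all
-- # (root, chord name) interpretations, so identify_chord_type is a single lookup.
-- _REVERSE = {}
-- for _pattern, _name in CHORD_PATTERNS.items():
--     for _root in range(12):
--         _key = tuple(sorted((_root + i) % 12 for i in _pattern))
--         _REVERSE.setdefault(_key, []).append((_root, _name))
--
-- def identify_chord_type(semitones: List[int]) -> str: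
--     if not semitones:
--         return ""
--     key = tuple(sorted({t % 12 for t in semitones}))
--     entries = _REVERSE.get(key)
--     if entries is None:
--         return "Unknown Chord"
--     lowest = min(semitones) % 12
--     for root, name in entries:
--         if root == lowest:
--             return f"{NOTE_NAMES[root]} {name}"
--     root, name = min(entries, key=lambda e: e[0])
--     return f"{NOTE_NAMES[root]} {name} (Inversion)"
-- ===== Notes on version B (the rewrite author's own statement) =====
-- stated objective: alternative
-- what changed: A re-derives a shifted interval pattern for the lowest note and then for every other unique tone; B precomputes once a reverse index mapping each concrete pitch-class set (canonical sorted tuple) to all its (root, chord-type) interpretations, so each call is a single table lookup plus root selection.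
import Mathlib
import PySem

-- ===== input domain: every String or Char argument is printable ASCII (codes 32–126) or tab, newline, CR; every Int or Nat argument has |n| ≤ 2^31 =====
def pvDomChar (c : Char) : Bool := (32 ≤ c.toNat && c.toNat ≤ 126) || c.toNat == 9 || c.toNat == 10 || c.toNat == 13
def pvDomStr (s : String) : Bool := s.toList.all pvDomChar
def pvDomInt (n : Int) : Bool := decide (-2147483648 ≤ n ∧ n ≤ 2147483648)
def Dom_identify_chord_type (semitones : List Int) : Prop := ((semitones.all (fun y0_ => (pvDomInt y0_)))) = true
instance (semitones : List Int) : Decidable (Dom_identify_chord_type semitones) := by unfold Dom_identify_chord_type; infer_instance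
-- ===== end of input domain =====

-- B replaces A's per-root pattern re-scan by one lookup in a reverse index built once
-- from CHORD_PATTERNS (objective: alternative decomposition; same per-call behaviour).


-- shared module constants (NOTE_NAMES, CHORD_PATTERNS as an insertion-ordered assoc list)
def pvNoteNames : List String := ["C", "C#", "D", "Eb", "E", "F", "F#", "G", "G#", "A", "Bb", "B"]

def pvChordPatterns : List (List Int × String) :=
  [([0, 4, 7], "Major"), ([0, 3, 7], "minor"), ([0, 4, 7, 10], "7"),
   ([0, 4, 7, 11], "Major 7"), ([0, 3, 7, 10], "minor 7"), ([0, 3, 7, 11], "minor Major 7"),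
   ([0, 4, 8], "Augmented"), ([0, 3, 6], "Diminished"), ([0, 3, 6, 9], "Diminished 7"),
   ([0, 3, 6, 10], "m7b5"), ([0, 2, 7], "Sus2"), ([0, 5, 7], "Sus4"),
   ([0, 7], "5 (Power Chord)"), ([0, 4, 7, 9], "6"), ([0, 3, 7, 9], "m6")]

-- ===== PORT A =====
-- NOTE_NAMES[semitones % 12]: the index is always in 0..11, so the .getD "" default is never used
def get_pitch_name (semitones : Int) : String :=
  (PySem.List.pyGet? pvNoteNames (PySem.Int.mod semitones 12)).getD ""

-- A's inner helper check_pattern (closure over unique_tones)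
def pvCheckPattern (unique_tones : List Int) (root : Int) : Option String :=
  let pattern := PySem.List.sorted (unique_tones.map (fun t => PySem.Int.mod (t - root) 12)) (fun x => x)
  match pvChordPatterns.find? (fun p => p.1 == pattern) with
  | some pr => some (get_pitch_name root ++ " " ++ pr.2)
  | none => none

-- A's loop "2. Try all other notes as roots (for inversions)"
def pvInvLoop (unique_tones : List Int) (root_candidate : Int) : List Int → String
  | [] => "Unknown Chord"
  | t :: rest =>
    if t == root_candidate then pvInvLoop unique_tones root_candidate rest
    else
      match pvCheckPattern unique_tones t with
      | some r => r ++ " (Inversion)"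
      | none => pvInvLoop unique_tones root_candidate rest

-- A's body after computing root_candidate and unique_tones
def identify_chord_type_core (unique_tones : List Int) (root_candidate : Int) : String :=
  match pvCheckPattern unique_tones root_candidate with
  | some r => r
  | none => pvInvLoop unique_tones root_candidate unique_tones

def identify_chord_type (semitones : List Int) : String :=
  match PySem.List.min? semitones (fun x => x) with
  | none => ""                                   -- "if not semitones: return ''"
  | some lowest_note =>
    identify_chord_type_core
      (PySem.List.sorted (PySem.Set.ofList (semitones.map (fun t => PySem.Int.mod t 12))) (fun x => x))
      (PySem.Int.mod lowest_note 12)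

-- ===== PORT B =====
-- _REVERSE: for each (pattern, name) and each root 0..11, file (root, name) under the
-- canonical key tuple(sorted((root+i)%12 for i in pattern)); setdefault+append = modify [] (· ++ [·])
def pvReverse : PySem.Dict (List Int) (List (Int × String)) :=
  pvChordPatterns.foldl
    (fun d pn =>
      (PySem.List.pyRange 0 12).foldl
        (fun d root =>
          d.modify (PySem.List.sorted (pn.1.map (fun i => PySem.Int.mod (root + i) 12)) (fun x => x)) []
            (· ++ [(root, pn.2)]))
        d)
    PySem.Dict.empty

-- B's body after the empty test, on the canonical key and lowest%12
def identify_chord_type_alt_core (key : List Int) (lowest : Int) : String :=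
  match pvReverse.get? key with
  | none => "Unknown Chord"
  | some entries =>
    match entries.find? (fun e => e.1 == lowest) with
    | some e => (PySem.List.pyGet? pvNoteNames e.1).getD "" ++ " " ++ e.2
    | none =>
      match PySem.List.min? entries (fun e => e.1) with   -- min(entries, key=lambda e: e[0])
      | some e => (PySem.List.pyGet? pvNoteNames e.1).getD "" ++ " " ++ e.2 ++ " (Inversion)"
      | none => "Unknown Chord"                  -- unreachable: the table's values are nonempty

def identify_chord_type_alt (semitones : List Int) : String :=
  match PySem.List.min? semitones (fun x => x) with
  | none => ""                                   -- "if not semitones: return ''"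
  | some m =>
    identify_chord_type_alt_core
      (PySem.List.sorted (PySem.Set.ofList (semitones.map (fun t => PySem.Int.mod t 12))) (fun x => x))
      (PySem.Int.mod m 12)

-- ===== PRECONDITION & SPEC =====
def Spec_identify_chord_type (semitones : List Int) (out : String) : Prop := out = identify_chord_type_alt semitones
instance (semitones : List Int) (out : String) : Decidable (Spec_identify_chord_type semitones out) := by unfold Spec_identify_chord_type; infer_instance

-- ===== CLAIM (what is proved, stated in full; the proofs are below) =====
def Claim_equal_identify_chord_type : Prop := ∀ (semitones : List Int), Dom_identify_chord_type semitones → Spec_identify_chord_type semitones (identify_chord_type semitones)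

-- ===== LEMMAS AND PROOFS =====

-- the pattern A compares against, and the key B indexes by
def pvShift (u : List Int) (root : Int) : List Int :=
  PySem.List.sorted (u.map (fun t => PySem.Int.mod (t - root) 12)) (fun x => x)

def pvKeyOf (p : List Int) (root : Int) : List Int :=
  PySem.List.sorted (p.map (fun i => PySem.Int.mod (root + i) 12)) (fun x => x)

-- the name A's find? associates to a root (unformatted)
def pvChk (u : List Int) (root : Int) : Option String :=
  (pvChordPatterns.find? (fun pr => pr.1 == pvShift u root)).map (·.2)

-- the flattened (key, (root, name)) stream B's table is built from
def pvBigPairs : List (List Int × (Int × String)) :=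
  pvChordPatterns.flatMap (fun pn => (PySem.List.pyRange 0 12).map (fun root => (pvKeyOf pn.1 root, (root, pn.2))))

-- the value list B's table stores under key u
def pvEntries (u : List Int) : List (Int × String) :=
  (pvBigPairs.filter (fun q => q.1 == u)).map (·.2)

theorem pv_nested_foldl {α β γ δ : Type} (l1 : List α) (l2 : List β) (h : α → β → γ)
    (g : δ → γ → δ) (init : δ) :
    l1.foldl (fun d a => l2.foldl (fun d b => g d (h a b)) d) init
      = (l1.flatMap (fun a => l2.map (h a))).foldl g init := by
  induction l1 generalizing init with
  | nil => rfl
  | cons a l1 ih => simp [List.foldl_append, List.foldl_map, ih]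

theorem pvReverse_getD (u : List Int) : (pvReverse.get? u).getD [] = pvEntries u := by
  have h1 : pvReverse = pvBigPairs.foldl (fun d q => d.modify q.1 [] (· ++ [q.2])) PySem.Dict.empty := by
    unfold pvReverse pvBigPairs pvKeyOf
    exact pv_nested_foldl pvChordPatterns (PySem.List.pyRange 0 12)
      (fun pn root => (PySem.List.sorted (pn.1.map (fun i => PySem.Int.mod (root + i) 12)) (fun x => x), (root, pn.2)))
      (fun d q => d.modify q.1 [] (· ++ [q.2])) PySem.Dict.empty
  rw [← PySem.Dict.getD_eq_get?_getD, h1, PySem.Dict.getD_foldl_modify_append]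
  simp [pvEntries]

theorem pv_mod12_bounds (x : Int) : 0 ≤ PySem.Int.mod x 12 ∧ PySem.Int.mod x 12 < 12 := by
  rw [PySem.Int.mod_eq_emod_of_pos (by norm_num)]
  omega

theorem pv_mod12_small {x : Int} (h0 : 0 ≤ x) (h1 : x < 12) : PySem.Int.mod x 12 = x := by
  rw [PySem.Int.mod_eq_emod_of_pos (by norm_num)]
  omega

theorem pv_gf {t r : Int} (ht : 0 ≤ t ∧ t < 12) (hr : 0 ≤ r ∧ r < 12) :
    PySem.Int.mod (r + PySem.Int.mod (t - r) 12) 12 = t := by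
  rw [PySem.Int.mod_eq_emod_of_pos (by norm_num), PySem.Int.mod_eq_emod_of_pos (by norm_num)]
  omega

theorem pv_fg {i r : Int} (hi : 0 ≤ i ∧ i < 12) (hr : 0 ≤ r ∧ r < 12) :
    PySem.Int.mod (PySem.Int.mod (r + i) 12 - r) 12 = i := by
  rw [PySem.Int.mod_eq_emod_of_pos (by norm_num), PySem.Int.mod_eq_emod_of_pos (by norm_num)]
  omega

theorem pv_ssorted_eq {a b : List Int} (ha : a.Pairwise (· < ·)) (hb : b.Pairwise (· < ·))
    (hm : ∀ x, x ∈ a ↔ x ∈ b) : a = b := by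
  have hna : a.Nodup := ha.imp ne_of_lt
  have hnb : b.Nodup := hb.imp ne_of_lt
  exact List.eq_of_perm_of_sorted (fun x y _ _ h1 h2 => le_antisymm h1 h2)
    (ha.imp le_of_lt) (hb.imp le_of_lt) ((List.perm_ext_iff_of_nodup hna hnb).mpr hm)

theorem pv_sorted_nodup_pairwise_lt (xs : List Int) (h : xs.Nodup) :
    (PySem.List.sorted xs (fun x => x)).Pairwise (· < ·) := by
  have hp := PySem.List.sorted_pairwise xs (fun x => x)
  have hn : (PySem.List.sorted xs (fun x => x)).Nodup :=
    ((PySem.List.sorted_perm xs (fun x => x) false).nodup_iff).mpr h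
  exact (hp.and hn).imp (fun h => lt_of_le_of_ne h.1 h.2)

-- the 15 patterns: strictly sorted, residues 0..11, containing 0, with distinct keys
theorem pv_patterns_facts : ∀ pn ∈ pvChordPatterns,
    pn.1.Pairwise (· < ·) ∧ (∀ i ∈ pn.1, 0 ≤ i ∧ i < 12) ∧ 0 ∈ pn.1 := by
  decide

theorem pv_find?_key_unique {l : List (List Int × String)} (v : List Int) (pr : List Int × String)
    (hnd : (l.map (·.1)).Nodup) :
    (l.find? (fun x => x.1 == v) = some pr ↔ pr ∈ l ∧ pr.1 = v) := by
  induction l with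
  | nil => simp
  | cons a l ih =>
    simp only [List.map_cons, List.nodup_cons, List.mem_map] at hnd
    by_cases ha : a.1 = v
    · rw [List.find?_cons_of_pos (by simp [ha])]
      constructor
      · intro h; injection h with h; subst h; exact ⟨List.mem_cons_self, ha⟩
      · rintro ⟨hmem, hpr⟩
        rcases List.mem_cons.mp hmem with h | h
        · rw [h]
        · exact absurd ⟨pr, h, by rw [hpr, ha]⟩ hnd.1
    · rw [List.find?_cons_of_neg (by simp [ha]), ih hnd.2]
      constructor
      · rintro ⟨h1, h2⟩; exact ⟨List.mem_cons_of_mem _ h1, h2⟩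
      · rintro ⟨h1, h2⟩
        rcases List.mem_cons.mp h1 with h | h
        · exact absurd (h ▸ h2) ha
        · exact ⟨h, h2⟩

theorem pv_patterns_keys_nodup : (pvChordPatterns.map (·.1)).Nodup := by decide

theorem pv_chk_some_iff (u : List Int) (root : Int) (name : String) :
    pvChk u root = some name ↔ ∃ p1, (p1, name) ∈ pvChordPatterns ∧ p1 = pvShift u root := by
  unfold pvChk
  constructor
  · intro h
    rcases Option.map_eq_some_iff.mp h with ⟨pr, hf, hn⟩
    rcases (pv_find?_key_unique _ pr pv_patterns_keys_nodup).mp hf with ⟨hmem, hkey⟩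
    exact ⟨pr.1, by rw [← hn]; simpa using hmem, hkey⟩
  · rintro ⟨p1, hmem, hkey⟩
    rw [(pv_find?_key_unique _ (p1, name) pv_patterns_keys_nodup).mpr ⟨hmem, hkey⟩]
    rfl

-- central fact: B's stored key equals u  ⇔  A's shifted pattern equals p
theorem pv_key_iff_shift {u p : List Int} {root : Int}
    (hu : u.Pairwise (· < ·)) (hub : ∀ x ∈ u, 0 ≤ x ∧ x < 12)
    (hp : p.Pairwise (· < ·)) (hpb : ∀ i ∈ p, 0 ≤ i ∧ i < 12)
    (hr : 0 ≤ root ∧ root < 12) :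
    pvKeyOf p root = u ↔ pvShift u root = p := by
  have hfg : ∀ i ∈ p, PySem.Int.mod (PySem.Int.mod (root + i) 12 - root) 12 = i :=
    fun i hi => pv_fg (hpb i hi) hr
  have hgf : ∀ t ∈ u, PySem.Int.mod (root + PySem.Int.mod (t - root) 12) 12 = t :=
    fun t ht => pv_gf (hub t ht) hr
  constructor
  · intro h
    have memu : ∀ t, t ∈ u ↔ ∃ i ∈ p, t = PySem.Int.mod (root + i) 12 := by
      intro t
      rw [← h]
      simp only [pvKeyOf, PySem.List.mem_sorted, List.mem_map]
      constructor
      · rintro ⟨i, hi, hit⟩; exact ⟨i, hi, hit.symm⟩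
      · rintro ⟨i, hi, hit⟩; exact ⟨i, hi, hit.symm⟩
    apply pv_ssorted_eq
    · apply pv_sorted_nodup_pairwise_lt
      apply List.Nodup.map_on _ (hu.imp ne_of_lt)
      intro x hx y hy hxy
      have h1 := hgf x hx
      have h2 := hgf y hy
      rw [hxy] at h1
      rw [← h1, h2]
    · exact hp
    · intro x
      simp only [pvShift, PySem.List.mem_sorted, List.mem_map]
      constructor
      · rintro ⟨t, ht, hft⟩
        rcases (memu t).mp ht with ⟨i, hi, hti⟩
        have : PySem.Int.mod (t - root) 12 = i := by rw [hti]; exact hfg i hi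
        rw [← hft, this]
        exact hi
      · intro hx
        refine ⟨PySem.Int.mod (root + x) 12, (memu _).mpr ⟨x, hx, rfl⟩, ?_⟩
        rw [hfg x hx]
  · intro h
    have memp : ∀ i, i ∈ p ↔ ∃ t ∈ u, i = PySem.Int.mod (t - root) 12 := by
      intro i
      rw [← h]
      simp only [pvShift, PySem.List.mem_sorted, List.mem_map]
      constructor
      · rintro ⟨t, ht, hti⟩; exact ⟨t, ht, hti.symm⟩
      · rintro ⟨t, ht, hti⟩; exact ⟨t, ht, hti.symm⟩
    apply pv_ssorted_eq
    · apply pv_sorted_nodup_pairwise_lt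
      apply List.Nodup.map_on _ (hp.imp ne_of_lt)
      intro x hx y hy hxy
      have h1 := hfg x hx
      have h2 := hfg y hy
      rw [hxy] at h1
      rw [← h1, h2]
    · exact hu
    · intro x
      simp only [pvKeyOf, PySem.List.mem_sorted, List.mem_map]
      constructor
      · rintro ⟨i, hi, hgi⟩
        rcases (memp i).mp hi with ⟨t, ht, hit⟩
        have : PySem.Int.mod (root + i) 12 = t := by rw [hit]; exact hgf t ht
        rw [← hgi, this]
        exact ht
      · intro hx
        refine ⟨PySem.Int.mod (x - root) 12, (memp _).mpr ⟨x, hx, rfl⟩, ?_⟩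
        rw [hgf x hx]

-- membership in B's table value ↔ A's check succeeds (with the root in range)
theorem pv_entries_iff {u : List Int} (hu : u.Pairwise (· < ·)) (hub : ∀ x ∈ u, 0 ≤ x ∧ x < 12)
    (root : Int) (name : String) :
    (root, name) ∈ pvEntries u ↔ (0 ≤ root ∧ root < 12) ∧ pvChk u root = some name := by
  have hmem : (root, name) ∈ pvEntries u ↔
      ∃ pn ∈ pvChordPatterns, ∃ r, (0 ≤ r ∧ r < 12) ∧ pvKeyOf pn.1 r = u ∧ r = root ∧ pn.2 = name := by
    simp only [pvEntries, pvBigPairs, List.mem_map, List.mem_filter, List.mem_flatMap,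
      PySem.List.mem_pyRange_one, beq_iff_eq]
    constructor
    · rintro ⟨q, ⟨⟨pn, hpn, r, hr, hq⟩, hk⟩, hrn⟩
      subst hq
      simp only at hk hrn
      rw [Prod.mk.injEq] at hrn
      exact ⟨pn, hpn, r, hr, hk, hrn.1, hrn.2⟩
    · rintro ⟨pn, hpn, r, hr, hku, hrr, hname⟩
      subst hrr
      exact ⟨(pvKeyOf pn.1 r, (r, pn.2)), ⟨⟨pn, hpn, r, hr, rfl⟩, hku⟩, by simp [hname]⟩
  rw [hmem]
  constructor
  · rintro ⟨pn, hpn, r, hr, hku, hrr, hname⟩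
    subst hrr hname
    obtain ⟨hps, hpb, -⟩ := pv_patterns_facts pn hpn
    refine ⟨hr, (pv_chk_some_iff u r pn.2).mpr ⟨pn.1, by simpa using hpn, ?_⟩⟩
    exact ((pv_key_iff_shift hu hub hps hpb hr).mp hku).symm
  · rintro ⟨hr, hchk⟩
    rcases (pv_chk_some_iff u root name).mp hchk with ⟨p1, hp1, hkey⟩
    obtain ⟨hps, hpb, -⟩ := pv_patterns_facts (p1, name) hp1
    exact ⟨(p1, name), hp1, root, hr, (pv_key_iff_shift hu hub hps hpb hr).mpr hkey.symm, rfl, rfl⟩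

theorem pv_root_mem {u : List Int} (hu : u.Pairwise (· < ·)) (hub : ∀ x ∈ u, 0 ≤ x ∧ x < 12)
    {root : Int} {name : String} (hr : 0 ≤ root ∧ root < 12) (h : pvChk u root = some name) :
    root ∈ u := by
  rcases (pv_chk_some_iff u root name).mp h with ⟨p1, hp1, hkey⟩
  obtain ⟨-, -, hz⟩ := pv_patterns_facts (p1, name) hp1
  have h0 : (0 : Int) ∈ pvShift u root := hkey ▸ hz
  simp only [pvShift, PySem.List.mem_sorted, List.mem_map] at h0
  rcases h0 with ⟨t, ht, h0⟩
  have hb := hub t ht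
  rw [PySem.Int.mod_eq_emod_of_pos (by norm_num)] at h0
  have : t = root := by omega
  exact this ▸ ht

theorem pv_check_eq_chk (u : List Int) (root : Int) :
    pvCheckPattern u root = (pvChk u root).map (fun nm => get_pitch_name root ++ " " ++ nm) := by
  simp only [pvCheckPattern, pvChk, pvShift]
  cases pvChordPatterns.find? (fun pr => pr.1 == PySem.List.sorted (u.map (fun t => PySem.Int.mod (t - root) 12)) (fun x => x)) <;> rfl

theorem pv_fmt_eq {root : Int} (hr : 0 ≤ root ∧ root < 12) :
    get_pitch_name root = (PySem.List.pyGet? pvNoteNames root).getD "" := by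
  unfold get_pitch_name
  rw [pv_mod12_small hr.1 hr.2]

theorem pv_invloop_unknown (u : List Int) (lowest : Int) (v : List Int)
    (h : ∀ t ∈ v, t = lowest ∨ pvChk u t = none) :
    pvInvLoop u lowest v = "Unknown Chord" := by
  induction v with
  | nil => rfl
  | cons t rest ih =>
    unfold pvInvLoop
    rcases h t List.mem_cons_self with ht | ht
    · rw [if_pos (beq_iff_eq.mpr ht)]
      exact ih (fun x hx => h x (List.mem_cons_of_mem _ hx))
    · by_cases hte : t = lowest
      · rw [if_pos (beq_iff_eq.mpr hte)]
        exact ih (fun x hx => h x (List.mem_cons_of_mem _ hx))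
      · rw [if_neg (by simp [hte]), pv_check_eq_chk, ht]
        exact ih (fun x hx => h x (List.mem_cons_of_mem _ hx))

theorem pv_invloop_found (u : List Int) (lowest : Int) (e1 : Int) (e2 : String) (v : List Int)
    (hv : v.Pairwise (· < ·)) (hve : e1 ∈ v)
    (hmin : ∀ t ∈ v, t < e1 → t = lowest ∨ pvChk u t = none)
    (he : pvChk u e1 = some e2) (hne : e1 ≠ lowest) :
    pvInvLoop u lowest v = get_pitch_name e1 ++ " " ++ e2 ++ " (Inversion)" := by
  induction v with
  | nil => cases hve
  | cons t rest ih =>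
    have hvt := List.pairwise_cons.mp hv
    unfold pvInvLoop
    by_cases hte : t = lowest
    · rw [if_pos (beq_iff_eq.mpr hte)]
      have he1r : e1 ∈ rest := by
        rcases List.mem_cons.mp hve with h | h
        · exact absurd (h ▸ hte) hne
        · exact h
      exact ih hvt.2 he1r (fun x hx => hmin x (List.mem_cons_of_mem _ hx))
    · rw [if_neg (by simp [hte]), pv_check_eq_chk]
      cases hc : pvChk u t with
      | some s =>
        have hte1 : t = e1 := by
          rcases List.mem_cons.mp hve with h | h
          · exact h.symm
          · exact absurd (hvt.1 e1 h) (by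
              intro hlt
              rcases hmin t List.mem_cons_self hlt with h1 | h1
              · exact hte h1
              · rw [hc] at h1; cases h1)
        subst hte1
        rw [hc] at he
        cases he
        rfl
      | none =>
        have he1r : e1 ∈ rest := by
          rcases List.mem_cons.mp hve with h | h
          · subst h; rw [hc] at he; cases he
          · exact h
        exact ih hvt.2 he1r (fun x hx => hmin x (List.mem_cons_of_mem _ hx))

-- the two cores agree on every strictly sorted residue list with lowest ∈ u
theorem pv_core_eq (u : List Int) (lowest : Int)
    (hu : u.Pairwise (· < ·)) (hub : ∀ x ∈ u, 0 ≤ x ∧ x < 12) (hlow : lowest ∈ u) :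
    identify_chord_type_core u lowest = identify_chord_type_alt_core u lowest := by
  have hlb := hub lowest hlow
  have hE := pvReverse_getD u
  unfold identify_chord_type_core identify_chord_type_alt_core
  rw [pv_check_eq_chk]
  cases hc : pvChk u lowest with
  | some name =>
    have hmemE : (lowest, name) ∈ pvEntries u := (pv_entries_iff hu hub lowest name).mpr ⟨hlb, hc⟩
    cases hg : pvReverse.get? u with
    | none =>
      rw [hg] at hE
      simp only [Option.getD_none] at hE
      rw [← hE] at hmemE
      cases hmemE
    | some es =>
      have hes : es = pvEntries u := by rw [hg] at hE; simpa using hE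
      subst hes
      cases hf : (pvEntries u).find? (fun e => e.1 == lowest) with
      | none =>
        rw [List.find?_eq_none] at hf
        exact absurd (by simp : ((lowest, name).1 == lowest) = true) (hf _ hmemE)
      | some e =>
        have he_mem := List.mem_of_find?_eq_some hf
        have hpred := List.find?_some hf
        have he1 : e.1 = lowest := by simpa using hpred
        have hee := (pv_entries_iff hu hub e.1 e.2).mp (by simpa using he_mem)
        rw [he1, hc] at hee
        have he2 : name = e.2 := Option.some.inj hee.2
        simp only [Option.map_some]
        simp [hf, he1, he2, pv_fmt_eq hlb]
  | none =>
    simp only [Option.map_none]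
    cases hg : pvReverse.get? u with
    | none =>
      rw [hg] at hE
      simp only [Option.getD_none] at hE
      apply pv_invloop_unknown
      intro t ht
      by_cases hct : pvChk u t = none
      · exact Or.inr hct
      · rcases Option.ne_none_iff_exists'.mp hct with ⟨nm, hnm⟩
        have : (t, nm) ∈ pvEntries u := (pv_entries_iff hu hub t nm).mpr ⟨hub t ht, hnm⟩
        rw [← hE] at this
        cases this
    | some es =>
      have hes : es = pvEntries u := by rw [hg] at hE; simpa using hE
      subst hes
      have hf : (pvEntries u).find? (fun e => e.1 == lowest) = none := by
        rw [List.find?_eq_none]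
        intro e he hpred
        have he1 : e.1 = lowest := beq_iff_eq.mp hpred
        have hee := (pv_entries_iff hu hub e.1 e.2).mp (by simpa using he)
        rw [he1, hc] at hee
        cases hee.2
      cases hm : PySem.List.min? (pvEntries u) (fun e => e.1) with
      | none =>
        have hnil : pvEntries u = [] := (PySem.List.min?_eq_none_iff _ _).mp hm
        rw [pv_invloop_unknown u lowest u ?_]
        · simp [hf, hm]
        intro t ht
        by_cases hct : pvChk u t = none
        · exact Or.inr hct
        · rcases Option.ne_none_iff_exists'.mp hct with ⟨nm, hnm⟩
          have hmem : (t, nm) ∈ pvEntries u := (pv_entries_iff hu hub t nm).mpr ⟨hub t ht, hnm⟩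
          rw [hnil] at hmem
          cases hmem
      | some e =>
        have he_mem : e ∈ pvEntries u := PySem.List.min?_mem hm
        have hee := (pv_entries_iff hu hub e.1 e.2).mp (by simpa using he_mem)
        have he1u : e.1 ∈ u := pv_root_mem hu hub hee.1 hee.2
        have hne : e.1 ≠ lowest := by
          intro h
          rw [h, hc] at hee
          cases hee.2
        have hmin : ∀ t ∈ u, t < e.1 → t = lowest ∨ pvChk u t = none := by
          intro t ht hlt
          by_cases hct : pvChk u t = none
          · exact Or.inr hct
          · rcases Option.ne_none_iff_exists'.mp hct with ⟨nm, hnm⟩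
            have hmem : (t, nm) ∈ pvEntries u := (pv_entries_iff hu hub t nm).mpr ⟨hub t ht, hnm⟩
            have := PySem.List.min?_isMin hm _ hmem
            simp only at this
            omega
        rw [pv_invloop_found u lowest e.1 e.2 u hu he1u hmin hee.2 hne, pv_fmt_eq (hub e.1 he1u)]
        simp [hf, hm]

-- ===== VERDICT (by name: the statement is the Claim_ definition above) =====
theorem identify_chord_type_spec : Claim_equal_identify_chord_type := by
  intro semitones _
  unfold Spec_identify_chord_type identify_chord_type identify_chord_type_alt
  cases hmin : PySem.List.min? semitones (fun x => x) with
  | none => rfl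
  | some m =>
    apply pv_core_eq
    · exact PySem.List.sorted_ofList_pairwise_lt _
    · intro x hx
      rw [PySem.List.mem_sorted, PySem.Set.mem_ofList, List.mem_map] at hx
      rcases hx with ⟨t, _, ht⟩
      exact ht ▸ pv_mod12_bounds t
    · rw [PySem.List.mem_sorted, PySem.Set.mem_ofList, List.mem_map]
      exact ⟨m, PySem.List.min?_mem hmin, rfl⟩
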